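-- pv_equiv track=rewrite | github.com/elliottbache/codility_lessons | src/count_non_divisible.py | factorization_sets
-- ===== SOURCE A (Python) =====
-- from typing import List, Set, Dict
--
-- def factorization_sets(max_element: int, possible_divisors: Set[int]) \
--         -> Dict[int, Set[int]]:
--     """Create dict of sets holding factorization for each integer.
--
--     Args:
--         max_element (int): The maximum element in the set.
--         possible_divisors (set[int]): The set of integers that are also
--             possible divisors.
--
--     Returns:
--         dict[int, Any]: A dict of sets holding factorization for each integer.
--
--     Usage:
--     >>> {k: sorted(v) for k, v in factorization_sets(max_element=6, \
--         possible_divisors={1, 2, 3, 6}).items()}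
--     {1: [1], 2: [1, 2], 3: [1, 3], 4: [1, 2], 5: [1], 6: [1, 2, 3, 6]}
--     """
--
--     F: Dict[int, Set[int]] = dict()
--     for i in possible_divisors:
--         k = i
--         while k <= max_element:
--             if k not in F:
--                 F[k] = set()
--             F[k].add(i)
--             k += i
--
--     return F
-- ===== SOURCE B (Python) =====
-- def factorization_sets(max_element, possible_divisors):
--     """For each divisor, walk its multiples up to max_element; the first time an
--     integer is reached, compute its complete divisor set in one pass."""
--     F = {}
--     for d in possible_divisors:
--         for k in range(d, max_element + 1, d):
--             if k not in F:
--                 F[k] = {i for i in possible_divisors if k % i == 0}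
--     return F
-- ===== Notes on version B (the rewrite author's own statement) =====
-- stated objective: alternative
-- what changed: Each dict entry is written exactly once: when a multiple k is first reached, B computes k's complete divisor set with a single divisibility-test comprehension, instead of A's incremental mutation of a growing set across all later divisors' while-loops; Pre_ restricts to strictly positive divisors, the function's natural domain, because on a divisor d <= 0 A loops forever whenever d <= max_element and the cases where it happens to return (all divisors nonpositive yet > max_element) are an accident of the never-entered while loop that B's upward range scan does not share.
-- outside the precondition, e.g. on factorization_sets(-1, {0}): A returns {}, B raises ValueError; on factorization_sets(-10, {-2}): A returns {}, B returns {-2: {-2}, -4: {-2}, -6: {-2}, -8: {-2}}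
import Mathlib
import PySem

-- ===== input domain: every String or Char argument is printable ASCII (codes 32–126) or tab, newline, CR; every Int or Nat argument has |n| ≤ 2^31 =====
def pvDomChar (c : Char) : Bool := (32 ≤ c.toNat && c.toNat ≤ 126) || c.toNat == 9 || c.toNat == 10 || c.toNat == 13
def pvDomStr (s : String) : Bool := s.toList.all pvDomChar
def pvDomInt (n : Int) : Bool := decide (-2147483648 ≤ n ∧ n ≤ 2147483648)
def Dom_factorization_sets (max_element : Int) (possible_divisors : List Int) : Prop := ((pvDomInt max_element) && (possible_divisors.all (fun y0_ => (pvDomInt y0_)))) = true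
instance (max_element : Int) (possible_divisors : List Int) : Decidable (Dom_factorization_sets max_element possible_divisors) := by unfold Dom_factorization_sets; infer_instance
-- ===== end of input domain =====

-- B writes each dict entry exactly once — when a multiple is first reached it computes that key's
-- complete divisor set by divisibility tests — instead of A's incremental mutation of growing sets
-- across all divisors' while-loops; same return value, no speed claim (objective: alternative).

-- ===== PORT A =====
-- 'if k not in F: F[k] = set()' then 'F[k].add(i)'
def fsetsStep (F : PySem.Dict Int (PySem.Set Int)) (k i : Int) : PySem.Dict Int (PySem.Set Int) :=
  let F1 := if F.contains k then F else F.insert k PySem.Set.empty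
  F1.modify k PySem.Set.empty (fun s => PySem.Set.add s i)

-- 'while k <= max_element: ... ; k += i'.  The fuel only makes the loop total: with
-- 1 ≤ i (Pre_) the loop runs at most max_element.toNat + 1 times, so the fuel is never exhausted.
def fsetsWhile (M i : Int) : Nat → Int → PySem.Dict Int (PySem.Set Int) → PySem.Dict Int (PySem.Set Int)
  | 0, _, F => F
  | fuel + 1, k, F =>
      if k ≤ M then fsetsWhile M i fuel (k + i) (fsetsStep F k i) else F

def factorization_sets (max_element : Int) (possible_divisors : List Int) : List (Int × List Int) :=
  (possible_divisors.foldl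
    (fun F i => fsetsWhile max_element i (max_element.toNat + 1) i F)
    PySem.Dict.empty).items

-- ===== PORT B =====
def factorization_sets_alt (max_element : Int) (possible_divisors : List Int) : List (Int × List Int) :=
  (possible_divisors.foldl
    (fun F d =>
      (PySem.List.pyRange d (max_element + 1) d).foldl
        (fun F k =>
          if F.contains k then F
          else F.insert k (PySem.Set.ofList (possible_divisors.filter (fun i => PySem.Int.mod k i == 0))))
        F)
    PySem.Dict.empty).items

-- ===== PRECONDITION & SPEC =====
-- Pre_ restricts to strictly positive divisors (the function's natural domain): on a divisor
-- d ≤ 0, A's 'while k <= max_element: k += i' loops forever whenever d ≤ max_element, and the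
-- cases where it happens to return (all divisors nonpositive yet > max_element) are an accident
-- of the never-entered while loop; Nodup is the set-argument convention (a Python set has no
-- duplicates).
def Pre_factorization_sets (max_element : Int) (possible_divisors : List Int) : Prop :=
  (∀ d ∈ possible_divisors, 1 ≤ d) ∧ possible_divisors.Nodup
instance (max_element : Int) (possible_divisors : List Int) : Decidable (Pre_factorization_sets max_element possible_divisors) := by unfold Pre_factorization_sets; infer_instance

def pvWitness_factorization_sets : Int × List Int := (6, [1, 2, 3, 6])

def Spec_factorization_sets (max_element : Int) (possible_divisors : List Int) (out : List (Int × List Int)) : Prop := out = factorization_sets_alt max_element possible_divisors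
instance (max_element : Int) (possible_divisors : List Int) (out : List (Int × List Int)) : Decidable (Spec_factorization_sets max_element possible_divisors out) := by unfold Spec_factorization_sets; infer_instance

-- ===== CLAIM (what is proved, stated in full; the proofs are below) =====
def Claim_equal_factorization_sets : Prop := ∀ (max_element : Int) (possible_divisors : List Int), Dom_factorization_sets max_element possible_divisors → Pre_factorization_sets max_element possible_divisors → Spec_factorization_sets max_element possible_divisors (factorization_sets max_element possible_divisors)

-- ===== LEMMAS AND PROOFS =====

-- Common characterisation, proved below equal to BOTH ports: the pairs (k, divisors of k) for
-- k in 1..M, listed grouped by the first divisor in the list that divides k.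
def fdDivs (es : List Int) (k : Int) : List Int := es.filter (fun e => decide (e ∣ k))

def fdBucket (M : Int) (es : List Int) (d : Int) : List Int :=
  (PySem.List.pyRange 1 (M + 1) 1).filter (fun k => (fdDivs es k).head? == some d)

def fdPairs (M : Int) (es : List Int) : List (Int × List Int) :=
  es.flatMap (fun d => (fdBucket M es d).map (fun k => (k, fdDivs es k)))

-- mid-loop dictionary contents of A: entries of `fdPairs M pre` whose key is a multiple of d
-- below K already carry d; fresh keys (multiples of d below K with no divisor in pre) are appended.
def fdMid (M : Int) (pre : List Int) (d K : Int) : List (Int × List Int) :=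
  (fdPairs M pre).map (fun p => if d ∣ p.1 ∧ p.1 < K then (p.1, p.2 ++ [d]) else p)
  ++ ((PySem.List.pyRange 1 (M + 1) 1).filter
       (fun k => decide (d ∣ k) && (fdDivs pre k).isEmpty && decide (k < K))).map
      (fun k => (k, ([d] : List Int)))

lemma fd_mult_unique {d a b : Int} (hd : 1 ≤ d) (ha : d ∣ a) (hb : d ∣ b)
    (h1 : b ≤ a) (h2 : a < b + d) : a = b := by
  obtain ⟨s, rfl⟩ := ha; obtain ⟨t, rfl⟩ := hb
  have hts : t ≤ s := by nlinarith
  have hst : s ≤ t := by nlinarith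
  rw [le_antisymm hst hts]

lemma fdDivs_append (pre : List Int) (d k : Int) :
    fdDivs (pre ++ [d]) k = fdDivs pre k ++ if d ∣ k then [d] else [] := by
  simp [fdDivs, List.filter_append]; split_ifs with h <;> simp [h]

lemma mem_fdPairs {M : Int} {es : List Int} {p : Int × List Int} (hp : p ∈ fdPairs M es) :
    1 ≤ p.1 ∧ p.1 ≤ M ∧ p.2 = fdDivs es p.1 ∧ fdDivs es p.1 ≠ [] := by
  simp only [fdPairs, List.mem_flatMap, List.mem_map, fdBucket, List.mem_filter,
    PySem.List.mem_pyRange_one] at hp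
  obtain ⟨d, hd, k, ⟨⟨hk1, hk2⟩, hhead⟩, rfl⟩ := hp
  refine ⟨hk1, by omega, rfl, fun h => ?_⟩
  rw [h] at hhead; simp at hhead

lemma fdPairs_mem_self {M k : Int} {es : List Int} (hk1 : 1 ≤ k) (hk2 : k ≤ M)
    (hne : fdDivs es k ≠ []) : (k, fdDivs es k) ∈ fdPairs M es := by
  obtain ⟨e, t, hh⟩ : ∃ e t, fdDivs es k = e :: t := by
    cases h : fdDivs es k
    · exact absurd h hne
    · exact ⟨_, _, rfl⟩
  have he : e ∈ es := by
    have : e ∈ fdDivs es k := by rw [hh]; exact List.mem_cons_self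
    exact (List.mem_filter.mp this).1
  simp only [fdPairs, List.mem_flatMap]
  exact ⟨e, he, List.mem_map.mpr ⟨k, List.mem_filter.mpr
    ⟨PySem.List.mem_pyRange_one.mpr ⟨hk1, by omega⟩, by rw [hh]; simp⟩, rfl⟩⟩

lemma mem_keys_fdPairs {M k : Int} {es : List Int} :
    k ∈ (fdPairs M es).map Prod.fst ↔ 1 ≤ k ∧ k ≤ M ∧ fdDivs es k ≠ [] := by
  constructor
  · intro h
    obtain ⟨p, hp, rfl⟩ := List.mem_map.mp h
    obtain ⟨h1, h2, _, h4⟩ := mem_fdPairs hp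
    exact ⟨h1, h2, h4⟩
  · rintro ⟨h1, h2, h3⟩
    exact List.mem_map.mpr ⟨(k, fdDivs es k), fdPairs_mem_self h1 h2 h3, rfl⟩

lemma fdPairs_keys (M : Int) (es : List Int) :
    (fdPairs M es).map Prod.fst = es.flatMap (fun d => fdBucket M es d) := by
  simp [fdPairs, List.map_flatMap, List.map_map, Function.comp_def]

lemma fdPairs_keys_nodup (M : Int) (es : List Int) (hnd : es.Nodup) :
    ((fdPairs M es).map Prod.fst).Nodup := by
  rw [fdPairs_keys, List.nodup_flatMap]
  refine ⟨fun d _ => (PySem.List.nodup_pyRange_one 1 (M+1)).filter _, ?_⟩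
  refine hnd.imp (fun {a b} hne => ?_)
  intro k hka hkb
  simp only [fdBucket, List.mem_filter, beq_iff_eq] at hka hkb
  exact hne (by rw [← Option.some_inj, ← hka.2, ← hkb.2])

lemma fdMid_keys (M : Int) (pre : List Int) (d K : Int) :
    (fdMid M pre d K).map Prod.fst
    = (fdPairs M pre).map Prod.fst
      ++ (PySem.List.pyRange 1 (M + 1) 1).filter
          (fun k => decide (d ∣ k) && (fdDivs pre k).isEmpty && decide (k < K)) := by
  simp only [fdMid, List.map_append, List.map_map]
  congr 1
  · refine List.map_congr_left (fun p _ => ?_)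
    simp only [Function.comp_apply]; split_ifs <;> rfl
  · simp [Function.comp_def]

lemma mem_mid_new_keys {M : Int} {pre : List Int} {d K k : Int}
    (h : k ∈ (PySem.List.pyRange 1 (M + 1) 1).filter
      (fun k => decide (d ∣ k) && (fdDivs pre k).isEmpty && decide (k < K))) :
    d ∣ k ∧ fdDivs pre k = [] ∧ k < K ∧ 1 ≤ k ∧ k ≤ M := by
  obtain ⟨hr, hp⟩ := List.mem_filter.mp h
  obtain ⟨h1, h2⟩ := PySem.List.mem_pyRange_one.mp hr
  simp only [Bool.and_eq_true, decide_eq_true_eq, List.isEmpty_iff] at hp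
  exact ⟨hp.1.1, hp.1.2, hp.2, h1, by omega⟩

lemma fdMid_keys_nodup (M : Int) (pre : List Int) (d K : Int) (hnd : pre.Nodup) :
    ((fdMid M pre d K).map Prod.fst).Nodup := by
  rw [fdMid_keys, List.nodup_append]
  refine ⟨fdPairs_keys_nodup M pre hnd, (PySem.List.nodup_pyRange_one 1 (M+1)).filter _, ?_⟩
  intro k hk1 k' hk2 heq
  subst heq
  obtain ⟨_, hempty, _, _, _⟩ := mem_mid_new_keys hk2
  exact (mem_keys_fdPairs.mp hk1).2.2 hempty

lemma fd_contains_mk {ν : Type} (L : List (Int × ν)) (k : Int) :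
    (PySem.Dict.mk L).contains k = decide (k ∈ L.map Prod.fst) := by
  rw [PySem.Dict.contains_mk, Bool.eq_iff_iff]
  simp [List.any_eq_true, List.mem_map, beq_iff_eq]

lemma fd_set_add_of_not_mem (s : PySem.Set Int) (x : Int) (h : x ∉ s) :
    PySem.Set.add s x = s ++ [x] := by
  simp [PySem.Set.add, PySem.Set.contains]
  intro hc
  exact absurd hc h

lemma fdMid_start (M : Int) (pre : List Int) (d : Int) (hd : 1 ≤ d) :
    fdMid M pre d d = fdPairs M pre := by
  unfold fdMid
  have h1 : ((PySem.List.pyRange 1 (M + 1) 1).filter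
      (fun k => decide (d ∣ k) && (fdDivs pre k).isEmpty && decide (k < d))) = [] := by
    rw [List.filter_eq_nil_iff]
    intro k hk
    obtain ⟨hk1, _⟩ := PySem.List.mem_pyRange_one.mp hk
    simp only [Bool.and_eq_true, decide_eq_true_eq, not_and]
    rintro ⟨hdk, _⟩ hlt
    exact absurd (Int.le_of_dvd (by omega) hdk) (by omega)
  rw [h1, List.map_nil, List.append_nil]
  refine (List.map_congr_left (fun p hp => ?_)).trans (List.map_id _)
  obtain ⟨hp1, _, _, _⟩ := mem_fdPairs hp
  rw [if_neg (fun hc => absurd (Int.le_of_dvd (by omega) hc.1) (by omega : ¬ d ≤ p.1))]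
  rfl

lemma fdMid_close (M : Int) (pre : List Int) (d K : Int) (hd : 1 ≤ d) (hdpre : d ∉ pre)
    (hK : M < K) : fdMid M pre d K = fdPairs M (pre ++ [d]) := by
  unfold fdMid
  rw [show fdPairs M (pre ++ [d]) = pre.flatMap
        (fun e => (fdBucket M (pre ++ [d]) e).map (fun k => (k, fdDivs (pre ++ [d]) k)))
      ++ (fdBucket M (pre ++ [d]) d).map (fun k => (k, fdDivs (pre ++ [d]) k)) by
    simp [fdPairs]]
  congr 1
  · -- old entries
    rw [fdPairs, List.map_flatMap]
    refine List.flatMap_congr (fun e he => ?_)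
    rw [List.map_map]
    have hbeq : fdBucket M (pre ++ [d]) e = fdBucket M pre e := by
      refine List.filter_congr (fun k _ => ?_)
      rw [fdDivs_append]
      cases h : fdDivs pre k with
      | nil =>
        simp only [h, List.nil_append]
        split_ifs <;> simp only [List.head?, Option.some.injEq, List.head?_nil] <;>
          rw [Bool.eq_iff_iff] <;> simp <;> rintro rfl <;> exact hdpre he
      | cons a t => simp [h]
    rw [hbeq]
    refine List.map_congr_left (fun k hk => ?_)
    obtain ⟨hkr, _⟩ := List.mem_filter.mp hk
    obtain ⟨hk1, hk2⟩ := PySem.List.mem_pyRange_one.mp hkr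
    simp only [Function.comp_apply, fdDivs_append]
    by_cases hdk : d ∣ k
    · rw [if_pos ⟨hdk, by omega⟩, if_pos hdk]
    · rw [if_neg (by rintro ⟨h, _⟩; exact hdk h), if_neg hdk, List.append_nil]
  · -- the new bucket
    have hbeq : fdBucket M (pre ++ [d]) d = (PySem.List.pyRange 1 (M + 1) 1).filter
        (fun k => decide (d ∣ k) && (fdDivs pre k).isEmpty && decide (k < K)) := by
      refine List.filter_congr (fun k hk => ?_)
      obtain ⟨hk1, hk2⟩ := PySem.List.mem_pyRange_one.mp hk
      rw [fdDivs_append]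
      cases h : fdDivs pre k with
      | nil =>
        simp only [List.nil_append, List.isEmpty_nil]
        split_ifs with hdk <;> rw [Bool.eq_iff_iff] <;> simp [hdk] ; omega
      | cons a t =>
        have ha : a ∈ pre := by
          have : a ∈ fdDivs pre k := by rw [h]; exact List.mem_cons_self
          exact (List.mem_filter.mp this).1
        rw [Bool.eq_iff_iff]
        simp only [List.cons_append, List.head?_cons, beq_iff_eq, Option.some.injEq,
          Bool.and_eq_true, List.isEmpty_iff]
        constructor
        · rintro rfl; exact absurd ha hdpre
        · rintro ⟨⟨_, hnil⟩, _⟩; exact absurd hnil (by simp [h])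
    rw [hbeq]
    refine List.map_congr_left (fun k hk => ?_)
    obtain ⟨hdk, hempty, _, _, _⟩ := mem_mid_new_keys hk
    rw [fdDivs_append, hempty, if_pos hdk, List.nil_append]

lemma fd_step (M : Int) (pre : List Int) (d k : Int)
    (hpreNd : pre.Nodup) (hd : 1 ≤ d) (hdpre : d ∉ pre)
    (hk1 : 1 ≤ k) (hdk : d ∣ k) (hkM : k ≤ M) :
    fsetsStep (PySem.Dict.mk (fdMid M pre d k)) k d
      = PySem.Dict.mk (fdMid M pre d (k + d)) := by
  have hknd : ((fdMid M pre d k).map Prod.fst).Nodup := fdMid_keys_nodup M pre d k hpreNd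
  have hkeysnd : (PySem.Dict.mk (fdMid M pre d k)).keys.Nodup := by
    simpa [PySem.Dict.keys] using hknd
  -- the two halves of fdMid
  have hA2eq : ∀ (hne : fdDivs pre k ≠ []),
      ((PySem.List.pyRange 1 (M + 1) 1).filter
        (fun x => decide (d ∣ x) && (fdDivs pre x).isEmpty && decide (x < k)))
      = ((PySem.List.pyRange 1 (M + 1) 1).filter
        (fun x => decide (d ∣ x) && (fdDivs pre x).isEmpty && decide (x < k + d))) := by
    intro hne
    refine List.filter_congr (fun x _ => ?_)
    rw [Bool.eq_iff_iff]
    simp only [Bool.and_eq_true, decide_eq_true_eq, List.isEmpty_iff, and_assoc]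
    constructor
    · rintro ⟨h1, h2, h3⟩; exact ⟨h1, h2, by omega⟩
    · rintro ⟨h1, h2, h3⟩
      refine ⟨h1, h2, ?_⟩
      by_contra hge
      have : x = k := fd_mult_unique hd h1 hdk (by omega) h3
      exact hne (this ▸ h2)
  -- case split: does some divisor of pre divide k?
  by_cases hne : fdDivs pre k = []
  · -- new key: appended at the end
    have hnotin : k ∉ (fdMid M pre d k).map Prod.fst := by
      rw [fdMid_keys, List.mem_append]
      rintro (h | h)
      · exact (mem_keys_fdPairs.mp h).2.2 hne
      · obtain ⟨_, _, hlt, _, _⟩ := mem_mid_new_keys h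
        omega
    have hcont : (PySem.Dict.mk (fdMid M pre d k)).contains k = false := by
      rw [fd_contains_mk]; simpa using hnotin
    have hstep : fsetsStep (PySem.Dict.mk (fdMid M pre d k)) k d
        = ((PySem.Dict.mk (fdMid M pre d k)).insert k PySem.Set.empty).insert k
            (PySem.Set.add
              (((PySem.Dict.mk (fdMid M pre d k)).insert k PySem.Set.empty).getD k PySem.Set.empty) d) := by
      simp [fsetsStep, hcont, PySem.Dict.modify]
    have hF1 : ((PySem.Dict.mk (fdMid M pre d k)).insert k PySem.Set.empty).items
        = fdMid M pre d k ++ [(k, PySem.Set.empty)] :=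
      PySem.Dict.items_insert_of_not_contains _ _ hcont
    have hG : (PySem.Dict.mk (fdMid M pre d k)).insert k PySem.Set.empty
        = PySem.Dict.mk (fdMid M pre d k ++ [(k, PySem.Set.empty)]) := PySem.Dict.ext hF1
    have hkeysG : (PySem.Dict.mk (fdMid M pre d k ++ [(k, PySem.Set.empty)])).keys.Nodup := by
      simp only [PySem.Dict.keys, PySem.Dict.items, List.map_append]
      rw [List.nodup_append]
      refine ⟨hknd, List.nodup_singleton _, ?_⟩
      intro a ha b hb hab
      simp only [List.map_cons, List.map_nil, List.mem_singleton] at hb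
      subst hb; subst hab
      exact hnotin ha
    have hcontG : (PySem.Dict.mk (fdMid M pre d k ++ [(k, PySem.Set.empty)])).contains k = true := by
      rw [fd_contains_mk]; simp
    have hgetDG : (PySem.Dict.mk (fdMid M pre d k ++ [(k, PySem.Set.empty)])).getD k PySem.Set.empty
        = PySem.Set.empty :=
      PySem.Dict.getD_of_mem_items _ (by simp) hkeysG _
    rw [hstep, hG, hgetDG]
    apply PySem.Dict.ext
    rw [PySem.Dict.items_insert_of_contains _ _ hcontG]
    show (fdMid M pre d k ++ [(k, PySem.Set.empty)]).map
        (fun p : Int × PySem.Set Int => if (p.1 == k) = true then (k, PySem.Set.add PySem.Set.empty d) else p)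
      = fdMid M pre d (k + d)
    have haddempty : PySem.Set.add PySem.Set.empty d = [d] := rfl
    rw [List.map_append, haddempty]
    have hLrepl : (fdMid M pre d k).map
        (fun p => if (p.1 == k) = true then (k, ([d] : List Int)) else p) = fdMid M pre d k := by
      refine (List.map_congr_left (fun p hp => ?_)).trans (List.map_id _)
      have hpk : p.1 ≠ k := by
        intro hh
        have hm : p.1 ∈ (fdMid M pre d k).map Prod.fst := List.mem_map.mpr ⟨p, hp, rfl⟩
        rw [hh] at hm
        exact hnotin hm
      simp [hpk]
    rw [hLrepl]
    have hA1 : (fdPairs M pre).map (fun p => if d ∣ p.1 ∧ p.1 < k then (p.1, p.2 ++ [d]) else p)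
        = (fdPairs M pre).map (fun p => if d ∣ p.1 ∧ p.1 < k + d then (p.1, p.2 ++ [d]) else p) := by
      refine List.map_congr_left (fun p hp => ?_)
      obtain ⟨hp1, hp2, hp3, hp4⟩ := mem_fdPairs hp
      by_cases hdp : d ∣ p.1
      · by_cases hlt : p.1 < k
        · rw [if_pos ⟨hdp, hlt⟩, if_pos ⟨hdp, by omega⟩]
        · rw [if_neg (fun hc => hlt hc.2), if_neg ?_]
          rintro ⟨_, hlt2⟩
          exact hp4 ((fd_mult_unique hd hdp hdk (by omega) hlt2) ▸ hne)
      · rw [if_neg (fun hc => hdp hc.1), if_neg (fun hc => hdp hc.1)]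
    have hsplit : PySem.List.pyRange 1 (M + 1) 1
        = (PySem.List.pyRange 1 k 1 ++ [k]) ++ PySem.List.pyRange (k + 1) (M + 1) 1 := by
      rw [PySem.List.pyRange_one_append (a := 1) (m := k + 1) (b := M + 1) (by omega) (by omega),
        PySem.List.pyRange_one_succ_right (by omega)]
    have hA2 : ((PySem.List.pyRange 1 (M + 1) 1).filter
          (fun x => decide (d ∣ x) && (fdDivs pre x).isEmpty && decide (x < k + d)))
        = ((PySem.List.pyRange 1 (M + 1) 1).filter
          (fun x => decide (d ∣ x) && (fdDivs pre x).isEmpty && decide (x < k))) ++ [k] := by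
      rw [hsplit]
      rw [List.filter_append, List.filter_append, List.filter_append, List.filter_append]
      have hseg1 : (PySem.List.pyRange 1 k 1).filter
            (fun x => decide (d ∣ x) && (fdDivs pre x).isEmpty && decide (x < k + d))
          = (PySem.List.pyRange 1 k 1).filter
            (fun x => decide (d ∣ x) && (fdDivs pre x).isEmpty && decide (x < k)) := by
        refine List.filter_congr (fun x hx => ?_)
        obtain ⟨hx1, hx2⟩ := PySem.List.mem_pyRange_one.mp hx
        simp [show x < k + d by omega, show x < k by omega]
      have hmid1 : ([k]).filter
            (fun x => decide (d ∣ x) && (fdDivs pre x).isEmpty && decide (x < k + d)) = [k] := by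
        simp [hdk, hne, show k < k + d by omega]
      have hmid2 : ([k]).filter
            (fun x => decide (d ∣ x) && (fdDivs pre x).isEmpty && decide (x < k)) = [] := by
        simp
      have hseg2 : ∀ K', K' ≤ k + d → (PySem.List.pyRange (k + 1) (M + 1) 1).filter
            (fun x => decide (d ∣ x) && (fdDivs pre x).isEmpty && decide (x < K')) = [] := by
        intro K' hK'
        rw [List.filter_eq_nil_iff]
        intro x hx
        obtain ⟨hx1, hx2⟩ := PySem.List.mem_pyRange_one.mp hx
        simp only [Bool.and_eq_true, decide_eq_true_eq, List.isEmpty_iff, not_and, and_imp]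
        intro hdx _ hlt
        have : x = k := fd_mult_unique hd hdx hdk (by omega) (by omega)
        omega
      rw [hseg1, hmid1, hmid2, hseg2 (k + d) (by omega), hseg2 k (by omega)]
      simp
    show _ = (fdPairs M pre).map (fun p => if d ∣ p.1 ∧ p.1 < k + d then (p.1, p.2 ++ [d]) else p)
        ++ ((PySem.List.pyRange 1 (M + 1) 1).filter
            (fun x => decide (d ∣ x) && (fdDivs pre x).isEmpty && decide (x < k + d))).map
          (fun x => (x, ([d] : List Int)))
    rw [hA2, ← hA1, List.map_append, fdMid, List.append_assoc]
    simp
  · -- k already has a divisor in pre: its entry is updated in place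
    have hmemP : (k, fdDivs pre k) ∈ fdPairs M pre := fdPairs_mem_self hk1 hkM hne
    have hmemL : (k, fdDivs pre k) ∈ fdMid M pre d k := by
      rw [fdMid, List.mem_append]
      exact Or.inl (List.mem_map.mpr ⟨(k, fdDivs pre k), hmemP,
        by rw [if_neg (fun hc => absurd hc.2 (by omega))]⟩)
    have hcont : (PySem.Dict.mk (fdMid M pre d k)).contains k = true := by
      rw [fd_contains_mk]
      simp only [decide_eq_true_eq, List.mem_map]
      exact ⟨(k, fdDivs pre k), hmemL, rfl⟩
    have hgetD : (PySem.Dict.mk (fdMid M pre d k)).getD k PySem.Set.empty = fdDivs pre k :=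
      PySem.Dict.getD_of_mem_items _ hmemL hkeysnd _
    have hadd : PySem.Set.add (fdDivs pre k) d = fdDivs pre k ++ [d] :=
      fd_set_add_of_not_mem _ _ (fun hm => hdpre (List.mem_filter.mp hm).1)
    have hstep : fsetsStep (PySem.Dict.mk (fdMid M pre d k)) k d
        = (PySem.Dict.mk (fdMid M pre d k)).insert k
            (PySem.Set.add ((PySem.Dict.mk (fdMid M pre d k)).getD k PySem.Set.empty) d) := by
      simp [fsetsStep, hcont, PySem.Dict.modify]
    rw [hstep, hgetD, hadd]
    apply PySem.Dict.ext
    rw [PySem.Dict.items_insert_of_contains _ _ hcont]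
    show (fdMid M pre d k).map
        (fun p : Int × PySem.Set Int =>
          if (p.1 == k) = true then (k, fdDivs pre k ++ [d]) else p)
      = fdMid M pre d (k + d)
    rw [fdMid, fdMid, List.map_append]
    congr 1
    · rw [List.map_map]
      refine List.map_congr_left (fun p hp => ?_)
      obtain ⟨p1, p2⟩ := p
      obtain ⟨hp1, hp2, hp3, hp4⟩ := mem_fdPairs hp
      simp only [Function.comp_apply] at *
      by_cases hpk : p1 = k
      · subst hpk
        rw [if_neg (show ¬(d ∣ p1 ∧ p1 < p1) from fun hc => absurd hc.2 (by omega))]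
        simp only [beq_self_eq_true, if_true]
        rw [if_pos ⟨hdk, by omega⟩, hp3]
      · have hinner : (if d ∣ p1 ∧ p1 < k then (p1, p2 ++ [d]) else (p1, p2))
            = (if d ∣ p1 ∧ p1 < k + d then (p1, p2 ++ [d]) else (p1, p2)) := by
          by_cases hdp : d ∣ p1
          · by_cases hlt : p1 < k
            · rw [if_pos ⟨hdp, hlt⟩, if_pos ⟨hdp, by omega⟩]
            · rw [if_neg (fun hc => hlt hc.2), if_neg ?_]
              rintro ⟨_, hlt2⟩
              exact hpk (fd_mult_unique hd hdp hdk (by omega) hlt2)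
          · rw [if_neg (fun hc => hdp hc.1), if_neg (fun hc => hdp hc.1)]
        rw [← hinner]
        have hfst : ((if d ∣ p1 ∧ p1 < k then (p1, p2 ++ [d]) else (p1, p2)) : Int × List Int).1
            = p1 := by split_ifs <;> rfl
        rw [if_neg (by rw [hfst]; simpa using hpk)]
    · rw [List.map_map, ← hA2eq hne]
      refine List.map_congr_left (fun x hx => ?_)
      obtain ⟨_, _, hlt, _, _⟩ := mem_mid_new_keys hx
      simp only [Function.comp_apply]
      rw [if_neg (by simpa using (by omega : x ≠ k))]

lemma fd_loop (M : Int) (pre : List Int) (d : Int)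
    (hpreNd : pre.Nodup) (hd : 1 ≤ d) (hdpre : d ∉ pre) :
    ∀ (fuel : Nat) (k : Int), 1 ≤ k → d ∣ k → M < k + d * fuel →
    fsetsWhile M d fuel k (PySem.Dict.mk (fdMid M pre d k))
      = PySem.Dict.mk (fdPairs M (pre ++ [d])) := by
  intro fuel
  induction fuel with
  | zero =>
    intro k hk1 hdk hfuel
    simp only [fsetsWhile]
    rw [fdMid_close M pre d k hd hdpre (by omega)]
  | succ n ih =>
    intro k hk1 hdk hfuel
    simp only [fsetsWhile]
    split_ifs with hkM
    · rw [fd_step M pre d k hpreNd hd hdpre hk1 hdk hkM]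
      exact ih (k + d) (by omega) (by exact dvd_add hdk (dvd_refl d)) (by push_cast at hfuel ⊢; linarith)
    · rw [fdMid_close M pre d k hd hdpre (by omega)]

lemma fd_divisor (M : Int) (pre : List Int) (d : Int)
    (hpreNd : pre.Nodup) (hd : 1 ≤ d) (hdpre : d ∉ pre) :
    fsetsWhile M d (M.toNat + 1) d (PySem.Dict.mk (fdPairs M pre))
      = PySem.Dict.mk (fdPairs M (pre ++ [d])) := by
  rw [← fdMid_start M pre d hd]
  refine fd_loop M pre d hpreNd hd hdpre _ d hd (dvd_refl d) ?_
  have h1 : (1 : Int) * ((M.toNat : Int) + 1) ≤ d * ((M.toNat : Int) + 1) :=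
    mul_le_mul_of_nonneg_right hd (by positivity)
  push_cast at h1 ⊢
  omega

lemma fd_fold (M : Int) : ∀ (suf pre : List Int),
    (∀ e ∈ pre ++ suf, 1 ≤ e) → (pre ++ suf).Nodup →
    suf.foldl (fun F i => fsetsWhile M i (M.toNat + 1) i F) (PySem.Dict.mk (fdPairs M pre))
      = PySem.Dict.mk (fdPairs M (pre ++ suf)) := by
  intro suf
  induction suf with
  | nil => intro pre _ _; simp
  | cons d suf ih =>
    intro pre hpos hnd
    have hdpre : d ∉ pre := by
      rw [List.nodup_append] at hnd
      intro hmem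
      exact hnd.2.2 d hmem d List.mem_cons_self rfl
    have hd : 1 ≤ d := hpos d (by simp)
    have hpreNd : pre.Nodup := (List.nodup_append.mp hnd).1
    simp only [List.foldl_cons]
    rw [fd_divisor M pre d hpreNd hd hdpre]
    have := ih (pre ++ [d]) (by intro e he; apply hpos; simpa [List.mem_append, or_assoc] using he)
      (by simpa [List.append_assoc] using hnd)
    rw [this, List.append_assoc]
    rfl

theorem A_eq_fdPairs (M : Int) (ds : List Int) (h1 : ∀ d ∈ ds, 1 ≤ d) (hnd : ds.Nodup) :
    factorization_sets M ds = fdPairs M ds := by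
  unfold factorization_sets
  have hempty : (PySem.Dict.empty : PySem.Dict Int (PySem.Set Int))
      = PySem.Dict.mk (fdPairs M []) := by
    simp [PySem.Dict.empty, fdPairs]
  rw [hempty, fd_fold M ds [] (by simpa using h1) (by simpa using hnd)]
  rfl

-- ---------- B side ----------

lemma fd_mod_beq (k d : Int) : (PySem.Int.mod k d == 0) = decide (d ∣ k) := by
  rw [Bool.eq_iff_iff]; simp [PySem.Int.mod_eq_zero_iff_dvd]

-- range(d, M+1, d) for 1 ≤ d lists exactly the multiples of d among 1..M, in order
lemma fd_pyRange_step (M d : Int) (hd : 1 ≤ d) :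
    PySem.List.pyRange d (M + 1) d
      = (PySem.List.pyRange 1 (M + 1) 1).filter (fun k => decide (d ∣ k)) := by
  have hmemL : ∀ x, x ∈ PySem.List.pyRange d (M + 1) d ↔ d ≤ x ∧ x < M + 1 ∧ d ∣ x - d :=
    PySem.List.mem_pyRange_iff_of_pos (by omega)
  have hsortL : (PySem.List.pyRange d (M + 1) d).Pairwise (· < ·) := by
    rw [PySem.List.pyRange_of_pos d (M + 1) (by omega : (0:Int) < d)]
    refine List.Pairwise.map _ (fun a b (hab : a < b) => ?_) List.pairwise_lt_range
    have hab' : (a : Int) < (b : Int) := by exact_mod_cast hab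
    nlinarith
  have hsortR : ((PySem.List.pyRange 1 (M + 1) 1).filter
      (fun k => decide (d ∣ k))).Pairwise (· < ·) :=
    (PySem.List.pairwise_lt_pyRange_one 1 (M + 1)).filter _
  have hmem : ∀ x, x ∈ PySem.List.pyRange d (M + 1) d
      ↔ x ∈ (PySem.List.pyRange 1 (M + 1) 1).filter (fun k => decide (d ∣ k)) := by
    intro x
    rw [hmemL x, List.mem_filter, PySem.List.mem_pyRange_one]
    simp only [decide_eq_true_eq]
    constructor
    · rintro ⟨h1, h2, h3⟩
      have hdx : d ∣ x := by simpa using dvd_add h3 (dvd_refl d)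
      exact ⟨⟨by omega, h2⟩, hdx⟩
    · rintro ⟨⟨h1, h2⟩, h3⟩
      exact ⟨Int.le_of_dvd (by omega) h3, h2, dvd_sub h3 (dvd_refl d)⟩
  have hperm : (PySem.List.pyRange d (M + 1) d).Perm
      ((PySem.List.pyRange 1 (M + 1) 1).filter (fun k => decide (d ∣ k))) := by
    refine (List.perm_ext_iff_of_nodup ?_ ?_).mpr hmem
    · exact hsortL.imp (fun h => ne_of_lt h)
    · exact hsortR.imp (fun h => ne_of_lt h)
  exact List.eq_of_perm_of_sorted
    (fun a b _ _ h1 h2 => le_antisymm (le_of_lt h1) (le_of_lt h2)) hsortL hsortR hperm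

-- B's inner fold over fresh-or-skip inserts
lemma fd_foldl_insert_if {ν : Type} (v : Int → ν) :
    ∀ (ks : List Int) (L : List (Int × ν)), ks.Nodup →
    ks.foldl (fun F k => if F.contains k then F else F.insert k (v k)) (PySem.Dict.mk L)
      = PySem.Dict.mk (L ++ (ks.filter (fun k => !decide (k ∈ L.map Prod.fst))).map
          (fun k => (k, v k))) := by
  intro ks
  induction ks with
  | nil => intro L _; simp
  | cons k ks ih =>
    intro L hnd
    have hknotin : k ∉ ks := (List.nodup_cons.mp hnd).1
    have hksnd : ks.Nodup := (List.nodup_cons.mp hnd).2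
    simp only [List.foldl_cons]
    by_cases hm : k ∈ L.map Prod.fst
    · rw [if_pos (by rw [fd_contains_mk]; simpa using hm)]
      rw [ih L hksnd]
      congr 2
      simp [List.filter_cons, hm]
    · rw [if_neg (by rw [fd_contains_mk]; simpa using hm)]
      have hins : (PySem.Dict.mk L).insert k (v k) = PySem.Dict.mk (L ++ [(k, v k)]) :=
        PySem.Dict.ext (PySem.Dict.items_insert_of_not_contains _ _
          (by rw [fd_contains_mk]; simpa using hm))
      rw [hins, ih _ hksnd]
      congr 1
      rw [List.filter_cons]
      simp only [hm, decide_false, Bool.not_false, if_true, List.map_cons, List.append_assoc,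
        List.singleton_append]
      congr 2
      refine congrArg (List.map _) (List.filter_congr (fun x hx => ?_))
      have hxk : x ≠ k := fun h => hknotin (h ▸ hx)
      simp [List.map_append, hxk, hm]

lemma fd_head_mem {es : List Int} {k a : Int} (h : (fdDivs es k).head? = some a) : a ∈ es :=
  (List.mem_filter.mp (List.mem_of_mem_head? h)).1

lemma fdDivs_split (pre suf : List Int) (k : Int) :
    fdDivs (pre ++ suf) k = fdDivs pre k ++ fdDivs suf k := by
  simp [fdDivs, List.filter_append]

-- which keys are already present after the prefix `pre` of divisors has been processed
lemma fd_mem_preKeys {M : Int} {pre suf : List Int} {k : Int}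
    (hdisj : ∀ a ∈ pre, a ∉ suf) :
    k ∈ pre.flatMap (fdBucket M (pre ++ suf)) ↔ (1 ≤ k ∧ k < M + 1 ∧ fdDivs pre k ≠ []) := by
  rw [List.mem_flatMap]
  constructor
  · rintro ⟨d', hd', hk⟩
    obtain ⟨hr, hh⟩ := List.mem_filter.mp hk
    obtain ⟨hb1, hb2⟩ := PySem.List.mem_pyRange_one.mp hr
    refine ⟨hb1, hb2, fun hemp => ?_⟩
    have hh' : (fdDivs (pre ++ suf) k).head? = some d' := by simpa using hh
    rw [fdDivs_split, hemp, List.nil_append] at hh'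
    exact hdisj d' hd' (fd_head_mem hh')
  · rintro ⟨hb1, hb2, hne⟩
    cases hc : fdDivs pre k with
    | nil => exact absurd hc hne
    | cons a t =>
      have ha : a ∈ pre := by
        have : a ∈ fdDivs pre k := by rw [hc]; exact List.mem_cons_self
        exact (List.mem_filter.mp this).1
      refine ⟨a, ha, List.mem_filter.mpr ⟨PySem.List.mem_pyRange_one.mpr ⟨hb1, hb2⟩, ?_⟩⟩
      rw [fdDivs_split, hc]
      simp

-- the keys B inserts during divisor d's pass are exactly d's bucket
lemma fd_new_bucket (M : Int) (pre suf : List Int) (d : Int) (hd : 1 ≤ d)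
    (hdpre : d ∉ pre) (hdsuf : d ∉ suf) (hdisj : ∀ a ∈ pre, a ∉ d :: suf) :
    (PySem.List.pyRange d (M + 1) d).filter
      (fun k => !decide (k ∈ pre.flatMap (fdBucket M (pre ++ d :: suf))))
    = fdBucket M (pre ++ d :: suf) d := by
  rw [fd_pyRange_step M d hd, List.filter_filter]
  show _ = (PySem.List.pyRange 1 (M + 1) 1).filter
    (fun k => (fdDivs (pre ++ d :: suf) k).head? == some d)
  refine List.filter_congr (fun k hk => ?_)
  obtain ⟨hb1, hb2⟩ := PySem.List.mem_pyRange_one.mp hk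
  rw [Bool.eq_iff_iff]
  simp only [Bool.and_eq_true, Bool.not_eq_true', decide_eq_false_iff_not, decide_eq_true_eq,
    beq_iff_eq]
  rw [fd_mem_preKeys hdisj]
  constructor
  · rintro ⟨hnm, hdk⟩
    have hemp : fdDivs pre k = [] := by
      by_contra hne
      exact hnm ⟨hb1, hb2, hne⟩
    rw [fdDivs_split, hemp, List.nil_append]
    have hcons : fdDivs (d :: suf) k = d :: fdDivs suf k := by
      simp [fdDivs, List.filter_cons, hdk]
    rw [hcons, List.head?_cons]
  · intro hh
    have hemp : fdDivs pre k = [] := by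
      cases hc : fdDivs pre k with
      | nil => rfl
      | cons a t =>
        have ha : a ∈ pre := by
          have : a ∈ fdDivs pre k := by rw [hc]; exact List.mem_cons_self
          exact (List.mem_filter.mp this).1
        rw [fdDivs_split, hc] at hh
        simp only [List.cons_append, List.head?_cons, Option.some.injEq] at hh
        exact absurd (hh ▸ ha) hdpre
    refine ⟨fun hc => hc.2.2 hemp, ?_⟩
    rw [fdDivs_split, hemp, List.nil_append] at hh
    by_contra hndk
    have hskip : fdDivs (d :: suf) k = fdDivs suf k := by
      simp [fdDivs, List.filter_cons, hndk]
    rw [hskip] at hh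
    exact hdsuf (fd_head_mem hh)

-- B's outer fold: after the prefix `pre`, the dict holds exactly the buckets of pre, in order
lemma fdB_fold (M : Int) (ds : List Int) (h1 : ∀ d ∈ ds, 1 ≤ d) (hnd : ds.Nodup) :
    ∀ (suf pre : List Int), ds = pre ++ suf →
    suf.foldl
      (fun F d => (PySem.List.pyRange d (M + 1) d).foldl
        (fun F k => if F.contains k then F
          else F.insert k (PySem.Set.ofList (fdDivs ds k))) F)
      (PySem.Dict.mk ((pre.flatMap (fdBucket M ds)).map
        (fun k => (k, PySem.Set.ofList (fdDivs ds k)))))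
    = PySem.Dict.mk ((ds.flatMap (fdBucket M ds)).map
        (fun k => (k, PySem.Set.ofList (fdDivs ds k)))) := by
  intro suf
  induction suf with
  | nil =>
    intro pre hds
    rw [List.foldl_nil, show pre = ds from by simpa using hds.symm]
  | cons d suf ih =>
    intro pre hds
    have h0 : (pre ++ d :: suf).Nodup := by rw [← hds]; exact hnd
    obtain ⟨hpreNd, hdsufNd, hdisj⟩ := List.nodup_append.mp h0
    have hdpre : d ∉ pre := fun h => hdisj d h d List.mem_cons_self rfl
    have hdsuf : d ∉ suf := (List.nodup_cons.mp hdsufNd).1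
    have hdisj' : ∀ a ∈ pre, a ∉ d :: suf := fun a ha hb => hdisj a ha a hb rfl
    have hd : 1 ≤ d := h1 d (by rw [hds]; simp)
    have hks_nd : (PySem.List.pyRange d (M + 1) d).Nodup := by
      rw [fd_pyRange_step M d hd]
      exact (PySem.List.nodup_pyRange_one 1 (M + 1)).filter _
    rw [List.foldl_cons,
      fd_foldl_insert_if (fun k => PySem.Set.ofList (fdDivs ds k)) _ _ hks_nd]
    have hkeys : ((pre.flatMap (fdBucket M ds)).map
        (fun k => (k, PySem.Set.ofList (fdDivs ds k)))).map Prod.fst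
        = pre.flatMap (fdBucket M ds) := by
      simp [List.map_map, Function.comp_def]
    rw [hkeys,
      show (PySem.List.pyRange d (M + 1) d).filter
          (fun k => !decide (k ∈ pre.flatMap (fdBucket M ds)))
        = fdBucket M ds d from by
        rw [hds]; exact fd_new_bucket M pre suf d hd hdpre hdsuf hdisj',
      show ((pre.flatMap (fdBucket M ds)).map
          (fun k => (k, PySem.Set.ofList (fdDivs ds k))))
        ++ (fdBucket M ds d).map (fun k => (k, PySem.Set.ofList (fdDivs ds k)))
        = ((pre ++ [d]).flatMap (fdBucket M ds)).map
          (fun k => (k, PySem.Set.ofList (fdDivs ds k))) from by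
        simp [List.flatMap_append]]
    exact ih (pre ++ [d]) (by rw [hds]; simp)

theorem B_eq_fdPairs (M : Int) (ds : List Int) (h1 : ∀ d ∈ ds, 1 ≤ d) (hnd : ds.Nodup) :
    factorization_sets_alt M ds = fdPairs M ds := by
  unfold factorization_sets_alt
  simp only [fd_mod_beq]
  show ((ds.foldl
      (fun F d => (PySem.List.pyRange d (M + 1) d).foldl
        (fun F k => if F.contains k then F
          else F.insert k (PySem.Set.ofList (fdDivs ds k))) F)
      (PySem.Dict.mk (([].flatMap (fdBucket M ds)).map
        (fun k => (k, PySem.Set.ofList (fdDivs ds k)))))).items) = fdPairs M ds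
  rw [fdB_fold M ds h1 hnd ds [] rfl]
  show ((ds.flatMap (fdBucket M ds)).map (fun k => (k, PySem.Set.ofList (fdDivs ds k))))
      = fdPairs M ds
  rw [fdPairs, List.flatMap_congr (fun d _ => rfl :
    ∀ d ∈ ds, (fdBucket M ds d).map (fun k => (k, fdDivs ds k))
      = (fdBucket M ds d).map (fun k => (k, fdDivs ds k))), ← List.map_flatMap]
  refine List.map_congr_left (fun k _ => ?_)
  simp [PySem.Set.ofList_eq_self_of_nodup _ (hnd.filter _), fdDivs]

-- ===== VERDICT (by name: the statement is the Claim_ definition above) =====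
theorem factorization_sets_spec : Claim_equal_factorization_sets := by
  intro M ds _ hpre
  unfold Spec_factorization_sets
  rw [A_eq_fdPairs M ds hpre.1 hpre.2, B_eq_fdPairs M ds hpre.1 hpre.2]
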